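-- pv_equiv track=rewrite | github.com/eliottcassidy2000/math | 04-computation/reduced_poly_P.py | get_ck
-- ===== SOURCE A (Python) =====
-- from math import comb, factorial
--
-- def eulerian_number(n, k):
--     return sum((-1)**j * comb(n+1, j) * (k+1-j)**n for j in range(k+1))
--
-- def get_ck(f, d):
--     """Get c_k^{(f,d)} for k = 0, ..., d."""
--     from math import comb as C
--     result = []
--     for k in range(d + 1):
--         total = 0
--         for j in range(max(0, k - (d - f)), min(f, k) + 1):
--             sign = (-1) ** (d - f - k + j)
--             total += eulerian_number(f + 1, j) * C(d - f, k - j) * sign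
--         result.append(total)
--     return result
-- ===== SOURCE B (Python) =====
-- from math import comb
--
--
-- def eulerian_number(n, k):
--     return sum((-1)**j * comb(n+1, j) * (k+1-j)**n for j in range(k+1))
--
--
-- def get_ck(f, d):
--     """Get c_k^{(f,d)} for k = 0, ..., d."""
--     result = [0] * (d + 1)
--     if 0 <= f <= d:
--         a = [eulerian_number(f + 1, j) for j in range(f + 1)]
--         b = [(-1) ** (d - f - m) * comb(d - f, m) for m in range(d - f + 1)]
--         for j, aj in enumerate(a):
--             for m, bm in enumerate(b):
--                 result[j + m] += aj * bm
--     return result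
-- ===== Notes on version B (the rewrite author's own statement) =====
-- stated objective: faster
-- what changed: B precomputes the Eulerian-number list and the signed binomial list once and scatter-adds their convolution into a zero-initialized result, instead of A's nested per-k loops that recompute every Eulerian number (itself a loop) for every k.
import Mathlib
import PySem

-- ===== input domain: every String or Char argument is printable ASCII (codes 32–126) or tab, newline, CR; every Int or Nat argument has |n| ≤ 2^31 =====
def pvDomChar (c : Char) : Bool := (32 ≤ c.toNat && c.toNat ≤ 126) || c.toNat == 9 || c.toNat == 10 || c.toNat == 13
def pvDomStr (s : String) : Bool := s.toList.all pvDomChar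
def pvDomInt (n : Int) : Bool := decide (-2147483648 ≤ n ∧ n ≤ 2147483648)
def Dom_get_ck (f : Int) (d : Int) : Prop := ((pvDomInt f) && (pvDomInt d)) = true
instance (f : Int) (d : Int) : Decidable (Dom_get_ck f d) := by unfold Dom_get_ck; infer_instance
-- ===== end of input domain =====

-- B replaces A's per-k inner loop (which recomputes every Eulerian number for every k) by one
-- scatter-convolution of two precomputed coefficient lists; return values are identical.

-- ===== PORT A =====
-- math.comb; exact for 0 ≤ n and 0 ≤ k, the only arguments either program ever passes to it
-- (Python raises ValueError on negative arguments; no executed call here is negative).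
def pyComb (n k : Int) : Int := ((n.toNat).choose k.toNat : Int)

-- eulerian_number(n, k) = sum((-1)**j * comb(n+1, j) * (k+1-j)**n for j in range(k+1));
-- the exponents j and n are nonnegative at every executed call, so .toNat is exact.
def eulerNum (n k : Int) : Int :=
  ((PySem.List.pyRange 0 (k+1) 1).map
    (fun j => (-1)^j.toNat * pyComb (n+1) j * (k+1-j)^n.toNat)).sum

-- literal port of A: for each k, an inner sum over j with per-term sign (-1)**(d-f-k+j)
-- (that exponent is ≥ 0 whenever the inner loop body runs, so .toNat is exact).
def get_ck (f : Int) (d : Int) : List Int :=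
  (PySem.List.pyRange 0 (d+1) 1).foldl (fun result k =>
    result ++ [(PySem.List.pyRange (max 0 (k - (d - f))) (min f k + 1) 1).foldl
      (fun total j => total + eulerNum (f+1) j * pyComb (d-f) (k-j) * (-1)^(d-f-k+j).toNat) 0]) []

-- ===== PORT B =====
-- literal port of B (Source B): result = [0]*(d+1); if 0 <= f <= d, build the two coefficient
-- lists a and b once and scatter-add a[j]*b[m] into result[j+m] (indices always in range).
def get_ck_alt (f : Int) (d : Int) : List Int :=
  let result := List.replicate (d+1).toNat (0:Int)
  if 0 ≤ f ∧ f ≤ d then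
    let a := (PySem.List.pyRange 0 (f+1) 1).map (fun j => eulerNum (f+1) j)
    let b := (PySem.List.pyRange 0 (d-f+1) 1).map (fun m => (-1)^(d-f-m).toNat * pyComb (d-f) m)
    (PySem.List.enumerate a 0).foldl (fun r ja =>
      (PySem.List.enumerate b 0).foldl (fun r mb =>
        PySem.List.pySetD r (ja.1+mb.1) (PySem.List.pyGetD r (ja.1+mb.1) 0 + ja.2*mb.2)) r) result
  else result

-- ===== PRECONDITION & SPEC =====
def Spec_get_ck (f : Int) (d : Int) (out : List Int) : Prop := out = get_ck_alt f d
instance (f : Int) (d : Int) (out : List Int) : Decidable (Spec_get_ck f d out) := by unfold Spec_get_ck; infer_instance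

-- ===== CLAIM (what is proved, stated in full; the proofs are below) =====
def Claim_equal_get_ck : Prop := ∀ (f : Int) (d : Int), Dom_get_ck f d → Spec_get_ck f d (get_ck f d)

-- ===== LEMMAS AND PROOFS =====

-- A's per-k inner loop, named.
def gA (f d k : Int) : Int :=
  (PySem.List.pyRange (max 0 (k - (d - f))) (min f k + 1) 1).foldl
    (fun total j => total + eulerNum (f+1) j * pyComb (d-f) (k-j) * (-1)^(d-f-k+j).toNat) 0

-- recursion computed by B's inner scatter loop: add c * b[m] at position t+m for each m.
def scat (c : Int) : List Int → Int → List Int → List Int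
  | [], _, r => r
  | x :: xs, t, r => scat c xs (t+1) (PySem.List.pySetD r t (PySem.List.pyGetD r t 0 + c*x))

-- recursion computed by B's outer loop: scatter row a[j] (value x, offset t) for each j.
def scatAll (bL : List Int) : List Int → Int → List Int → List Int
  | [], _, r => r
  | x :: xs, t, r => scatAll bL xs (t+1) (scat x bL t r)

-- the contribution of rows t, t+1, … to position k.
def conv (bL : List Int) : List Int → Int → Nat → Int
  | [], _, _ => 0
  | x :: xs, t, k =>
      (if t ≤ (k:Int) ∧ (k:Int) < t + bL.length then x * bL.getD ((k:Int) - t).toNat 0 else 0)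
        + conv bL xs (t+1) k

lemma sum_map_pyRange_Ico_aux (S : Int → Int) :
    ∀ (n : Nat) (a : Int),
      ((PySem.List.pyRange a (a+n) 1).map S).sum = ∑ j ∈ Finset.Ico a (a+(n:Int)), S j := by
  intro n
  induction n with
  | zero => intro a; rw [PySem.List.pyRange_one_eq_nil (by omega), Finset.Ico_eq_empty (by omega)]; simp
  | succ n ih =>
      intro a
      rw [PySem.List.pyRange_one_cons (by push_cast; omega)]
      have h1 : a + ((n:Int)+1) = (a+1) + (n:Int) := by ring
      have h2 : Finset.Ico a (a + ((n:Int)+1)) = insert a (Finset.Ico (a+1) (a + ((n:Int)+1))) := by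
        ext x; simp; omega
      push_cast
      rw [h2, Finset.sum_insert (by simp), List.map_cons, List.sum_cons, h1, ih (a+1)]

lemma sum_map_pyRange_Ico (S : Int → Int) (a b : Int) :
    ((PySem.List.pyRange a b 1).map S).sum = ∑ j ∈ Finset.Ico a b, S j := by
  by_cases h : b ≤ a
  · rw [PySem.List.pyRange_one_eq_nil h, Finset.Ico_eq_empty (by omega)]; simp
  · have : b = a + ((b-a).toNat : Int) := by omega
    rw [this, sum_map_pyRange_Ico_aux]

lemma fold_enum_eq_scat (c jI : Int) (b : List Int) :
    ∀ (s : Int) (r : List Int),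
      (PySem.List.enumerate b s).foldl (fun r mb =>
        PySem.List.pySetD r (jI+mb.1) (PySem.List.pyGetD r (jI+mb.1) 0 + c*mb.2)) r
      = scat c b (jI+s) r := by
  induction b with
  | nil => intro s r; simp [PySem.List.enumerate_nil, scat]
  | cons x xs ih =>
      intro s r
      rw [PySem.List.enumerate_cons, List.foldl_cons, ih (s+1), scat]
      ring_nf

lemma length_scat (c : Int) (b : List Int) :
    ∀ (t : Int) (r : List Int), (scat c b t r).length = r.length := by
  induction b with
  | nil => intro t r; rfl
  | cons x xs ih => intro t r; rw [scat, ih, PySem.List.length_pySetD]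

lemma scat_getD (c : Int) (b : List Int) :
    ∀ (t : Int) (r : List Int) (k : Nat), 0 ≤ t → t + b.length ≤ r.length →
      (scat c b t r).getD k 0
        = r.getD k 0 + (if t ≤ (k:Int) ∧ (k:Int) < t + b.length
            then c * b.getD ((k:Int) - t).toNat 0 else 0) := by
  induction b with
  | nil =>
      intro t r k h0 hb
      rw [scat, if_neg (by simp only [List.length_nil, Nat.cast_zero, add_zero]; omega)]
      simp
  | cons x xs ih =>
      intro t r k h0 hb
      simp only [List.length_cons] at hb
      push_cast at hb
      have htlt : t < (r.length : Int) := by omega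
      rw [scat, ih (t+1) _ k (by omega)
        (by rw [PySem.List.length_pySetD]; omega)]
      rw [PySem.List.pySetD_of_nonneg r _ h0]
      have hGet : PySem.List.pyGetD r t 0 = r.getD t.toNat 0 := by
        rw [PySem.List.pyGetD_eq_getElem r 0 h0 htlt, List.getD_eq_getElem r 0 (by omega)]
      by_cases hk : (k:Int) = t
      · have hkt : k = t.toNat := by omega
        rw [if_pos (show t ≤ (k:Int) ∧ (k:Int) < t + ((x::xs).length:Int) by
              simp only [List.length_cons]; push_cast; omega),
            if_neg (by omega)]
        have hidx : ((k:Int) - t).toNat = 0 := by omega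
        rw [hidx, List.getD_cons_zero]
        rw [List.getD_eq_getElem _ 0 (by rw [List.length_set]; omega),
            List.getElem_set, if_pos hkt.symm, hGet, hkt]
        ring
      · have hne : t.toNat ≠ k := by omega
        have hset : (r.set t.toNat (PySem.List.pyGetD r t 0 + c*x)).getD k 0 = r.getD k 0 := by
          rcases Nat.lt_or_ge k r.length with hlt | hge
          · rw [List.getD_eq_getElem _ 0 (by rw [List.length_set]; omega),
                List.getD_eq_getElem _ 0 hlt, List.getElem_set, if_neg hne]
          · rw [List.getD_eq_default _ 0 (by rw [List.length_set]; omega),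
                List.getD_eq_default _ 0 hge]
        rw [hset]
        by_cases hc : t + 1 ≤ (k:Int) ∧ (k:Int) < t + 1 + xs.length
        · rw [if_pos hc, if_pos (by simp only [List.length_cons]; push_cast at hc ⊢; omega)]
          have hidx : ((k:Int) - t).toNat = ((k:Int) - (t+1)).toNat + 1 := by omega
          rw [hidx, List.getD_cons_succ]
        · rw [if_neg hc, if_neg (by simp only [List.length_cons]; push_cast at hc ⊢; omega)]

lemma fold_outer_eq_scatAll (bL : List Int) :
    ∀ (aL : List Int) (s : Int) (r : List Int),
      (PySem.List.enumerate aL s).foldl (fun r ja =>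
        (PySem.List.enumerate bL 0).foldl (fun r mb =>
          PySem.List.pySetD r (ja.1+mb.1) (PySem.List.pyGetD r (ja.1+mb.1) 0 + ja.2*mb.2)) r) r
      = scatAll bL aL s r := by
  intro aL
  induction aL with
  | nil => intro s r; simp [PySem.List.enumerate_nil, scatAll]
  | cons x xs ih =>
      intro s r
      rw [PySem.List.enumerate_cons, List.foldl_cons, fold_enum_eq_scat, add_zero, ih (s+1), scatAll]

lemma length_scatAll (bL : List Int) :
    ∀ (aL : List Int) (t : Int) (r : List Int), (scatAll bL aL t r).length = r.length := by
  intro aL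
  induction aL with
  | nil => intro t r; rfl
  | cons x xs ih => intro t r; rw [scatAll, ih, length_scat]

lemma scatAll_getD (bL : List Int) :
    ∀ (aL : List Int) (t : Int) (r : List Int) (k : Nat), 0 ≤ t →
      t + aL.length + bL.length ≤ r.length + 1 →
      (scatAll bL aL t r).getD k 0 = r.getD k 0 + conv bL aL t k := by
  intro aL
  induction aL with
  | nil => intro t r k h0 hb; simp [scatAll, conv]
  | cons x xs ih =>
      intro t r k h0 hb
      simp only [List.length_cons] at hb
      rw [scatAll, ih (t+1) _ k (by omega)
            (by rw [length_scat]; push_cast at hb ⊢; omega),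
          scat_getD x bL t r k h0 (by push_cast at hb ⊢; omega), conv]
      ring

lemma conv_map_pyRange (bL : List Int) (A : Int → Int) (k : Nat) :
    ∀ (n : Nat) (s : Int),
      conv bL ((PySem.List.pyRange s (s+n) 1).map A) s k
      = ∑ j ∈ Finset.Ico s (s+(n:Int)),
          (if j ≤ (k:Int) ∧ (k:Int) < j + bL.length
            then A j * bL.getD ((k:Int) - j).toNat 0 else 0) := by
  intro n
  induction n with
  | zero =>
      intro s
      rw [PySem.List.pyRange_one_eq_nil (by omega), Finset.Ico_eq_empty (by omega)]
      simp [conv]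
  | succ n ih =>
      intro s
      rw [show Finset.Ico s (s+((n+1:Nat):Int))
            = insert s (Finset.Ico (s+1) ((s+1)+(n:Int))) from by ext x; simp; omega]
      rw [Finset.sum_insert (by simp)]
      rw [PySem.List.pyRange_one_cons (by push_cast; omega), List.map_cons, conv]
      rw [show s + ((n+1:Nat):Int) = (s+1)+(n:Int) from by push_cast; ring]
      rw [ih (s+1)]

-- the per-index equality, for the main case 0 ≤ f ≤ d and 0 ≤ k ≤ d.
lemma conv_eq_gA (f d : Int) (k : Nat) (hf : 0 ≤ f) (hfd : f ≤ d) :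
    conv ((PySem.List.pyRange 0 (d-f+1) 1).map (fun m => (-1)^(d-f-m).toNat * pyComb (d-f) m))
      ((PySem.List.pyRange 0 (f+1) 1).map (fun j => eulerNum (f+1) j)) 0 k
      = gA f d k := by
  have hlenb : ((((PySem.List.pyRange 0 (d-f+1) 1).map
      (fun m => (-1)^(d-f-m).toNat * pyComb (d-f) m)).length : Nat) : Int) = d - f + 1 := by
    rw [List.length_map, PySem.List.length_pyRange_one]; omega
  unfold gA
  rw [PySem.List.foldl_add, zero_add, sum_map_pyRange_Ico]
  rw [show (f+1 : Int) = 0 + (((f+1).toNat : Nat) : Int) from by omega]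
  rw [conv_map_pyRange]
  rw [← Finset.sum_filter]
  apply Finset.sum_congr
  · ext x
    simp only [Finset.mem_filter, Finset.mem_Ico, hlenb]
    omega
  · intro x hx
    rw [Finset.mem_Ico] at hx
    have hx0 : max 0 ((k:Int) - (d - f)) ≤ x := hx.1
    have hx1 : x < min f (k:Int) + 1 := hx.2
    rw [← PySem.List.pyGetD_natCast _ ((k:Int)-x).toNat 0,
        show ((((k:Int)-x).toNat : Nat) : Int) = (k:Int) - x from by omega,
        PySem.List.pyGetD_map_pyRange_of_nonneg _ (d-f+1) _ 0 (by omega) (by omega)]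
    rw [show d - f - ((k:Int) - x) = d - f - k + x from by ring]
    rw [show (0 : Int) + (((f+1).toNat : Nat) : Int) = f + 1 from by omega]
    ring

theorem main_eq (f d : Int) : get_ck f d = get_ck_alt f d := by
  have hA : get_ck f d = (PySem.List.pyRange 0 (d+1) 1).map (gA f d) := by
    unfold get_ck
    rw [PySem.List.foldl_append_singleton_eq_map, List.nil_append]
    rfl
  by_cases hmain : 0 ≤ f ∧ f ≤ d
  · simp only [get_ck_alt]
    rw [if_pos hmain, fold_outer_eq_scatAll, hA]
    have hla : ((PySem.List.pyRange 0 (f+1) 1).map (fun j => eulerNum (f+1) j)).length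
        = (f+1).toNat := by rw [List.length_map, PySem.List.length_pyRange_one]; omega
    have hlb : ((PySem.List.pyRange 0 (d-f+1) 1).map
        (fun m => (-1)^(d-f-m).toNat * pyComb (d-f) m)).length
        = (d-f+1).toNat := by rw [List.length_map, PySem.List.length_pyRange_one]; omega
    apply List.ext_getElem
    · rw [List.length_map, PySem.List.length_pyRange_one, length_scatAll,
          List.length_replicate]
      omega
    · intro i h1 h2
      have hi : i < (d+1).toNat := by
        rw [length_scatAll, List.length_replicate] at h2; exact h2
      rw [List.getElem_map, PySem.List.getElem_pyRange_one, zero_add]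
      rw [← List.getD_eq_getElem _ 0 h2]
      rw [scatAll_getD _ _ 0 _ i (le_refl 0)
            (by rw [hla, hlb, List.length_replicate]; omega)]
      rw [List.getD_replicate _ hi, zero_add]
      exact (conv_eq_gA f d i hmain.1 hmain.2).symm
  · simp only [get_ck_alt]
    rw [if_neg hmain, hA]
    rw [List.eq_replicate_iff]
    constructor
    · rw [List.length_map, PySem.List.length_pyRange_one]; omega
    · intro x hx
      rcases List.mem_map.mp hx with ⟨kk, hkk, rfl⟩
      have hk' := PySem.List.mem_pyRange_one.mp hkk
      unfold gA
      rw [PySem.List.pyRange_one_eq_nil (by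
        rcases not_and_or.mp hmain with h | h <;> omega)]
      rfl

-- ===== VERDICT (by name: the statement is the Claim_ definition above) =====
theorem get_ck_spec : Claim_equal_get_ck := by
  intro f d _
  unfold Spec_get_ck
  exact main_eq f d
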